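-- pv_equiv track=rewrite | github.com/truckirwin/devguard | AI_PROJECTS/NotesGen/backend/app/services/ai_notes_service.py | _select_relevant_aws_links
-- ===== SOURCE A (Python) =====
-- def _select_relevant_aws_links(context: str, verified_links: list) -> list:
--     """Select 2-3 relevant AWS documentation links based on slide content."""
--     context_lower = context.lower()
--     selected = []
--
--     # Always include the main AWS documentation
--     selected.append("https://docs.aws.amazon.com/")
--
--     # Select service-specific links based on content keywords
--     if any(keyword in context_lower for keyword in ['machine learning', 'ml', 'sagemaker', 'model', 'train']):
--         selected.append("https://docs.aws.amazon.com/sagemaker/latest/dg/")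
--     elif any(keyword in context_lower for keyword in ['data', 'etl', 'glue', 'pipeline', 'engineering']):
--         selected.append("https://docs.aws.amazon.com/glue/latest/dg/")
--     elif any(keyword in context_lower for keyword in ['compute', 'ec2', 'instance', 'server']):
--         selected.append("https://docs.aws.amazon.com/ec2/latest/userguide/")
--     elif any(keyword in context_lower for keyword in ['storage', 's3', 'bucket', 'object']):
--         selected.append("https://docs.aws.amazon.com/s3/latest/userguide/")
--     elif any(keyword in context_lower for keyword in ['database', 'rds', 'sql', 'mysql', 'postgres']):
--         selected.append("https://docs.aws.amazon.com/rds/latest/userguide/")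
--     elif any(keyword in context_lower for keyword in ['warehouse', 'redshift', 'analytics']):
--         selected.append("https://docs.aws.amazon.com/redshift/latest/dg/")
--     elif any(keyword in context_lower for keyword in ['stream', 'kinesis', 'real-time', 'streaming']):
--         selected.append("https://docs.aws.amazon.com/kinesis/latest/dev/")
--     elif any(keyword in context_lower for keyword in ['serverless', 'lambda', 'function']):
--         selected.append("https://docs.aws.amazon.com/lambda/latest/dg/")
--     elif any(keyword in context_lower for keyword in ['big data', 'emr', 'hadoop', 'spark']):
--         selected.append("https://docs.aws.amazon.com/emr/latest/ManagementGuide/")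
--     else:
--         # Default: add getting started guide for general content
--         selected.append("https://aws.amazon.com/getting-started/")
--
--     # Add architecture guidance if not already at 3 links
--     if len(selected) < 3:
--         selected.append("https://aws.amazon.com/architecture/")
--
--     return selected[:3]  # Return maximum 3 links
-- ===== SOURCE B (Python) =====
-- _AWS_LINK_RULES = [
--     (['machine learning', 'ml', 'sagemaker', 'model', 'train'],
--      "https://docs.aws.amazon.com/sagemaker/latest/dg/"),
--     (['data', 'etl', 'glue', 'pipeline', 'engineering'],
--      "https://docs.aws.amazon.com/glue/latest/dg/"),
--     (['compute', 'ec2', 'instance', 'server'],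
--      "https://docs.aws.amazon.com/ec2/latest/userguide/"),
--     (['storage', 's3', 'bucket', 'object'],
--      "https://docs.aws.amazon.com/s3/latest/userguide/"),
--     (['database', 'rds', 'sql', 'mysql', 'postgres'],
--      "https://docs.aws.amazon.com/rds/latest/userguide/"),
--     (['warehouse', 'redshift', 'analytics'],
--      "https://docs.aws.amazon.com/redshift/latest/dg/"),
--     (['stream', 'kinesis', 'real-time', 'streaming'],
--      "https://docs.aws.amazon.com/kinesis/latest/dev/"),
--     (['serverless', 'lambda', 'function'],
--      "https://docs.aws.amazon.com/lambda/latest/dg/"),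
--     (['big data', 'emr', 'hadoop', 'spark'],
--      "https://docs.aws.amazon.com/emr/latest/ManagementGuide/"),
-- ]
--
-- # Flattened keyword-level table: one (keyword, url) pair per keyword, in rule order.
-- _AWS_KEYWORD_URLS = [(k, url) for keywords, url in _AWS_LINK_RULES for k in keywords]
--
--
-- def _select_relevant_aws_links(context: str, verified_links: list) -> list:
--     """Select relevant AWS documentation links based on slide content.
--
--     Exhaustive backward pass: walk the flattened keyword table in REVERSE and
--     overwrite the topic on every hit, so the last write comes from the
--     highest-priority matching keyword (last-write-wins replaces first-match
--     search).  One topic link is always chosen, hence exactly three links.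
--     """
--     context_lower = context.lower()
--     topic = "https://aws.amazon.com/getting-started/"
--     for keyword, url in reversed(_AWS_KEYWORD_URLS):
--         if keyword in context_lower:
--             topic = url
--     return ["https://docs.aws.amazon.com/", topic,
--             "https://aws.amazon.com/architecture/"]
-- ===== Notes on version B (the rewrite author's own statement) =====
-- stated objective: alternative
-- what changed: Replaces the first-match if/elif chain by an exhaustive last-write-wins backward pass over a flattened (keyword,url) table: every keyword is tested, hits overwrite the topic, and since traversal is reversed the last write is the highest-priority match; the length check and [:3] cap disappear because exactly three links are always produced.
import Mathlib
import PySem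

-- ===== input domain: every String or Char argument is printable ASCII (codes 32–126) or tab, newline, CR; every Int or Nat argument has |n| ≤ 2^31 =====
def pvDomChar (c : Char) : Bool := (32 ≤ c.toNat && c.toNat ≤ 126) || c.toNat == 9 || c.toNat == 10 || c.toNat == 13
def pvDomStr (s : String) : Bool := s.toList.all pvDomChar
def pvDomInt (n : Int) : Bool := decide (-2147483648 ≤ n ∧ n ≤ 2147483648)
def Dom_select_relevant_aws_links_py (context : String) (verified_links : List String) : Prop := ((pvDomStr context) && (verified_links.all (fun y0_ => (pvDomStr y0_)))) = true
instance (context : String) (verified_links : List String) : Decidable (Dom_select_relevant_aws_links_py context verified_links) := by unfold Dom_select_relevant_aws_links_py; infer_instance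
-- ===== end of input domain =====

-- B replaces A's first-match if/elif chain by an exhaustive last-write-wins backward pass
-- over a flattened (keyword, url) table; same return value (alternative decomposition).

-- ===== PORT A =====
-- any(keyword in context_lower for keyword in kws)
def anyKw (kws : List String) (cl : String) : Bool := kws.any (fun k => PySem.Str.isIn k cl)

def select_relevant_aws_links_py (context : String) (_verified_links : List String) : List String :=
  let context_lower := PySem.Str.lower context
  let selected : List String := []
  let selected := selected ++ ["https://docs.aws.amazon.com/"]
  let selected :=
    if anyKw ["machine learning", "ml", "sagemaker", "model", "train"] context_lower then
      selected ++ ["https://docs.aws.amazon.com/sagemaker/latest/dg/"]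
    else if anyKw ["data", "etl", "glue", "pipeline", "engineering"] context_lower then
      selected ++ ["https://docs.aws.amazon.com/glue/latest/dg/"]
    else if anyKw ["compute", "ec2", "instance", "server"] context_lower then
      selected ++ ["https://docs.aws.amazon.com/ec2/latest/userguide/"]
    else if anyKw ["storage", "s3", "bucket", "object"] context_lower then
      selected ++ ["https://docs.aws.amazon.com/s3/latest/userguide/"]
    else if anyKw ["database", "rds", "sql", "mysql", "postgres"] context_lower then
      selected ++ ["https://docs.aws.amazon.com/rds/latest/userguide/"]
    else if anyKw ["warehouse", "redshift", "analytics"] context_lower then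
      selected ++ ["https://docs.aws.amazon.com/redshift/latest/dg/"]
    else if anyKw ["stream", "kinesis", "real-time", "streaming"] context_lower then
      selected ++ ["https://docs.aws.amazon.com/kinesis/latest/dev/"]
    else if anyKw ["serverless", "lambda", "function"] context_lower then
      selected ++ ["https://docs.aws.amazon.com/lambda/latest/dg/"]
    else if anyKw ["big data", "emr", "hadoop", "spark"] context_lower then
      selected ++ ["https://docs.aws.amazon.com/emr/latest/ManagementGuide/"]
    else
      selected ++ ["https://aws.amazon.com/getting-started/"]
  let selected :=
    if selected.length < 3 then selected ++ ["https://aws.amazon.com/architecture/"] else selected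
  selected.take 3

-- ===== PORT B =====
def awsLinkRules : List (List String × String) :=
  [ (["machine learning", "ml", "sagemaker", "model", "train"], "https://docs.aws.amazon.com/sagemaker/latest/dg/"),
    (["data", "etl", "glue", "pipeline", "engineering"], "https://docs.aws.amazon.com/glue/latest/dg/"),
    (["compute", "ec2", "instance", "server"], "https://docs.aws.amazon.com/ec2/latest/userguide/"),
    (["storage", "s3", "bucket", "object"], "https://docs.aws.amazon.com/s3/latest/userguide/"),
    (["database", "rds", "sql", "mysql", "postgres"], "https://docs.aws.amazon.com/rds/latest/userguide/"),
    (["warehouse", "redshift", "analytics"], "https://docs.aws.amazon.com/redshift/latest/dg/"),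
    (["stream", "kinesis", "real-time", "streaming"], "https://docs.aws.amazon.com/kinesis/latest/dev/"),
    (["serverless", "lambda", "function"], "https://docs.aws.amazon.com/lambda/latest/dg/"),
    (["big data", "emr", "hadoop", "spark"], "https://docs.aws.amazon.com/emr/latest/ManagementGuide/") ]

-- flattened keyword-level table: one (keyword, url) pair per keyword, in rule order
def awsKeywordUrls : List (String × String) :=
  awsLinkRules.flatMap (fun r => r.1.map (fun k => (k, r.2)))

def select_relevant_aws_links_py_alt (context : String) (_verified_links : List String) : List String :=
  let context_lower := PySem.Str.lower context
  let topic := awsKeywordUrls.reverse.foldl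
      (fun acc p => if PySem.Str.isIn p.1 context_lower then p.2 else acc)
      "https://aws.amazon.com/getting-started/"
  ["https://docs.aws.amazon.com/", topic, "https://aws.amazon.com/architecture/"]

-- ===== PRECONDITION & SPEC =====
def Spec_select_relevant_aws_links_py (context : String) (verified_links : List String) (out : List String) : Prop := out = select_relevant_aws_links_py_alt context verified_links
instance (context : String) (verified_links : List String) (out : List String) : Decidable (Spec_select_relevant_aws_links_py context verified_links out) := by unfold Spec_select_relevant_aws_links_py; infer_instance

-- ===== CLAIM (what is proved, stated in full; the proofs are below) =====
def Claim_equal_select_relevant_aws_links_py : Prop := ∀ (context : String) (verified_links : List String), Dom_select_relevant_aws_links_py context verified_links → Spec_select_relevant_aws_links_py context verified_links (select_relevant_aws_links_py context verified_links)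

-- ===== LEMMAS AND PROOFS =====
-- Folding B's step over one rule's segment (all pairs carry the same url u)
-- returns u iff some keyword of the segment occurs in cl, else the accumulator.
theorem seg_fold (cl u : String) (kws : List String) (acc : String) :
    List.foldl (fun acc p => if PySem.Str.isIn p.1 cl then p.2 else acc) acc
      (kws.map (fun k => (k, u)))
      = if anyKw kws cl then u else acc := by
  induction kws generalizing acc with
  | nil => simp [anyKw]
  | cons k ks ih =>
    rw [List.map_cons, List.foldl_cons, ih]
    simp only [anyKw, List.any_cons]
    by_cases h : PySem.Chars.isIn k.toList cl.toList = true
    · simp [PySem.Str.isIn, h]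
    · simp [PySem.Str.isIn, h]

-- B's backward last-write-wins pass over the flattened table equals a foldr
-- (first-match) over the rule table.
theorem rev_flat_fold (cl fb : String) (rules : List (List String × String)) :
    List.foldl (fun acc p => if PySem.Str.isIn p.1 cl then p.2 else acc) fb
      (rules.flatMap (fun r => r.1.map (fun k => (k, r.2)))).reverse
      = rules.foldr (fun r acc => if anyKw r.1 cl then r.2 else acc) fb := by
  induction rules with
  | nil => simp
  | cons r rs ih =>
    simp only [List.flatMap_cons, List.reverse_append, List.foldl_append, ih,
      List.foldr_cons]
    rw [List.map_reverse.symm, seg_fold]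
    have : anyKw r.1.reverse cl = anyKw r.1 cl := by simp [anyKw]
    rw [this]

set_option maxHeartbeats 1000000 in
theorem select_alt_eq (context : String) (vl : List String) :
    select_relevant_aws_links_py context vl = select_relevant_aws_links_py_alt context vl := by
  unfold select_relevant_aws_links_py select_relevant_aws_links_py_alt awsKeywordUrls
  simp only [rev_flat_fold]
  dsimp only [awsLinkRules, List.foldr]
  simp only [List.nil_append, apply_ite List.length, List.length_append, List.length_cons, List.length_nil, Nat.reduceAdd, ite_self]
  rw [if_pos (by norm_num : (2:Nat) < 3)]
  split_ifs <;> rfl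

-- ===== VERDICT (by name: the statement is the Claim_ definition above) =====
theorem select_relevant_aws_links_py_spec : Claim_equal_select_relevant_aws_links_py := by
  intro context vl _
  unfold Spec_select_relevant_aws_links_py
  exact select_alt_eq context vl
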